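-- pv_equiv track=rewrite | github.com/Alt-F17/coding-cat-Felix-s-Problem | mutation/sum-odd-n-even-index-mutation/solution.py | sum_odd_n_even_index_mutation
-- ===== SOURCE A (Python) =====
-- def sum_odd_n_even_index_mutation(input_list):
--     output = 0
--     if(len(input_list) % 2 == 0):
--         for i in range(len(input_list)):
--             if i % 2 != 0:
--                 output += input_list[i]
--     else:
--         for i in range(len(input_list)):
--             if i % 2 == 0:
--                 output += input_list[i]
--     return output
-- ===== SOURCE B (Python) =====
-- def sum_odd_n_even_index_mutation(input_list):
--     # Skip the first element when the length is even, then sum every other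
--     # element: each loop step takes one element and skips the next.
--     it = iter(input_list[1:] if len(input_list) % 2 == 0 else input_list)
--     total = 0
--     for v in it:
--         total += v
--         next(it, None)  # skip one
--     return total
-- ===== Notes on version B (the rewrite author's own statement) =====
-- stated objective: simpler
-- what changed: Replaces A's two indexed loops (each scanning all indices and filtering by index parity) with a single take-one-skip-one loop over the list after dropping the first element when the length is even, so there is no index arithmetic and no per-element parity test.
import Mathlib
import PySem

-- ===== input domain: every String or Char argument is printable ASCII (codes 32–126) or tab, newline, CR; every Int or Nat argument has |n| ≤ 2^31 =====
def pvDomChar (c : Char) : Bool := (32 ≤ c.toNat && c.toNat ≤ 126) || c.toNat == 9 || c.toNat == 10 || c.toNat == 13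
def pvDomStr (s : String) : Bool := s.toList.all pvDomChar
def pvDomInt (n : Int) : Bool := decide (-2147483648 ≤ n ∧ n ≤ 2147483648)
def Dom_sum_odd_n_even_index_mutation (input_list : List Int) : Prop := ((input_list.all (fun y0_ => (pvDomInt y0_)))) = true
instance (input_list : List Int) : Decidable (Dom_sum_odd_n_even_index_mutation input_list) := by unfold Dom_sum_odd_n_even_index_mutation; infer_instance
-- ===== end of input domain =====

-- B replaces A's two indexed parity-filter loops by one head-and-drop-two loop over
-- a list whose first element is dropped when the length is even (objective: simpler).

-- ===== PORT A =====
def sum_odd_n_even_index_mutation (input_list : List Int) : Int :=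
  if ((input_list.length : Int)) % 2 == 0 then
    (PySem.List.pyRange 0 (input_list.length : Int) 1).foldl
      (fun output i => if i % 2 ≠ 0 then output + PySem.List.pyGetD input_list i 0 else output) 0
  else
    (PySem.List.pyRange 0 (input_list.length : Int) 1).foldl
      (fun output i => if i % 2 == 0 then output + PySem.List.pyGetD input_list i 0 else output) 0

-- ===== PORT B =====
-- the while loop of Source B: take the head, drop two, accumulate
def sumAltLoop : List Int → Int → Int
  | [], total => total
  | x :: rest, total => sumAltLoop (rest.drop 1) (total + x)
  termination_by xs _ => xs.length
  decreasing_by simp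

def sum_odd_n_even_index_mutation_alt (input_list : List Int) : Int :=
  let xs := if ((input_list.length : Int)) % 2 == 0
            then PySem.List.slice input_list (some 1) none else input_list
  sumAltLoop xs 0

-- ===== PRECONDITION & SPEC =====
def Spec_sum_odd_n_even_index_mutation (input_list : List Int) (out : Int) : Prop := out = sum_odd_n_even_index_mutation_alt input_list
instance (input_list : List Int) (out : Int) : Decidable (Spec_sum_odd_n_even_index_mutation input_list out) := by unfold Spec_sum_odd_n_even_index_mutation; infer_instance

-- ===== CLAIM (what is proved, stated in full; the proofs are below) =====
def Claim_equal_sum_odd_n_even_index_mutation : Prop := ∀ (input_list : List Int), Dom_sum_odd_n_even_index_mutation input_list → Spec_sum_odd_n_even_index_mutation input_list (sum_odd_n_even_index_mutation input_list)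

-- ===== LEMMAS AND PROOFS =====

-- sum of every other element (elements at even offsets); proof-side helper
def everyOther : List Int → Int
  | [] => 0
  | x :: rest => x + everyOther (rest.drop 1)
  termination_by xs => xs.length
  decreasing_by simp

theorem everyOther_nil : everyOther [] = 0 := by rw [everyOther]

theorem everyOther_cons (x : Int) (r : List Int) :
    everyOther (x :: r) = x + everyOther (r.drop 1) := by rw [everyOther]

theorem sumAltLoop_eq (xs : List Int) (t : Int) : sumAltLoop xs t = t + everyOther xs := by
  fun_induction sumAltLoop xs t with
  | case1 t => simp [everyOther_nil]
  | case2 x rest t ih => rw [everyOther_cons, ih]; ring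

-- A's loop over enumerate, odd-index condition
theorem foldl_enum_odd (l : List Int) (s acc : Int) :
    (PySem.List.enumerate l s).foldl
        (fun output q => if q.1 % 2 ≠ 0 then output + q.2 else output) acc
      = acc + (if s % 2 ≠ 0 then everyOther l else everyOther (l.drop 1)) := by
  induction l generalizing s acc with
  | nil => simp [PySem.List.enumerate_nil, everyOther_nil]
  | cons x rest ih =>
      rw [PySem.List.enumerate_cons, List.foldl_cons, ih]
      by_cases h : s % 2 = 0
      · have h1 : (s + 1) % 2 ≠ 0 := by omega
        simp [h, h1]
      · have h1 : (s + 1) % 2 = 0 := by omega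
        simp [h, h1, everyOther_cons]
        ring

-- A's loop over enumerate, even-index condition
theorem foldl_enum_even (l : List Int) (s acc : Int) :
    (PySem.List.enumerate l s).foldl
        (fun output q => if q.1 % 2 == 0 then output + q.2 else output) acc
      = acc + (if s % 2 == 0 then everyOther l else everyOther (l.drop 1)) := by
  induction l generalizing s acc with
  | nil => simp [PySem.List.enumerate_nil, everyOther_nil]
  | cons x rest ih =>
      rw [PySem.List.enumerate_cons, List.foldl_cons, ih]
      by_cases h : s % 2 = 0
      · have h1 : (s + 1) % 2 ≠ 0 := by omega
        simp [h, h1, everyOther_cons]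
        ring
      · have h1 : (s + 1) % 2 = 0 := by omega
        simp [h, h1]

-- the pyRange index loop is the enumerate loop
theorem pyRange_eq_enum (l : List Int) (f : Int → Int × Int → Int) :
    (PySem.List.pyRange 0 (l.length : Int) 1).foldl
        (fun output i => f output (i, PySem.List.pyGetD l i 0)) 0
      = (PySem.List.enumerate l 0).foldl f 0 := by
  rw [PySem.List.enumerate_eq_map_pyRange (d := 0), List.foldl_map]
  simp [PySem.List.len_eq]

-- ===== VERDICT =====
theorem sum_odd_n_even_index_mutation_spec : Claim_equal_sum_odd_n_even_index_mutation := by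
  intro l _
  unfold Spec_sum_odd_n_even_index_mutation
  unfold sum_odd_n_even_index_mutation sum_odd_n_even_index_mutation_alt
  by_cases h : ((l.length : Int)) % 2 = 0
  · simp only [h, beq_self_eq_true, if_true]
    rw [pyRange_eq_enum l (fun output q => if q.1 % 2 ≠ 0 then output + q.2 else output),
        foldl_enum_odd, sumAltLoop_eq, PySem.List.slice_from_one]
    simp [List.drop_one]
  · have hb : (((l.length : Int)) % 2 == 0) = false := by simpa using h
    simp only [hb]
    rw [pyRange_eq_enum l (fun output q => if q.1 % 2 == 0 then output + q.2 else output),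
        foldl_enum_even, sumAltLoop_eq]
    simp
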